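-- pv_equiv track=rewrite | github.com/QUSETIONS/MiniCode-Python | minicode/safe_execution.py | assess_command_risk
-- ===== SOURCE A (Python) =====
-- from enum import Enum
--
-- class RiskLevel(str, Enum):
--     """Operation risk levels."""
--     SAFE = "safe"           # Read-only operations
--     LOW = "low"             # Minor writes (config files)
--     MEDIUM = "medium"       # Source code modifications
--     HIGH = "high"           # Database operations, deployments
--     CRITICAL = "critical"   # Destructive operations (rm -rf, drop table)
--
-- _CRITICAL_COMMANDS = frozenset({
--     "rm", "shred", "dd", "mkfs", "fdisk", "format",
--     "dropdb", "drop", "truncate",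
-- })
--
-- _HIGH_COMMANDS = frozenset({
--     "sudo", "su", "chmod", "chown", "mount", "umount",
--     "systemctl", "service", "brew", "apt", "yum", "dnf",
-- })
--
-- _MEDIUM_COMMANDS = frozenset({
--     "git", "npm", "pip", "cargo", "go", "make", "cmake",
--     "docker", "docker-compose", "kubectl",
-- })
--
-- def assess_command_risk(command: str, args: list[str]) -> RiskLevel:
--     """Assess the risk level of a command execution.
--
--     Args:
--         command: The command to execute
--         args: Command arguments
--
--     Returns:
--         RiskLevel indicating required isolation
--     """
--     cmd_base = command.lower().split("/")[-1]
--
--     # Critical: Destructive operations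
--     if cmd_base in _CRITICAL_COMMANDS:
--         return RiskLevel.CRITICAL
--
--     # Check for destructive flags
--     destructive_flags = {"-rf", "-fr", "--force", "--recursive", "--no-preserve-root"}
--     if any(flag in args for flag in destructive_flags):
--         return RiskLevel.CRITICAL
--
--     # High: System operations
--     if cmd_base in _HIGH_COMMANDS:
--         return RiskLevel.HIGH
--
--     # Medium: Development tools
--     if cmd_base in _MEDIUM_COMMANDS:
--         return RiskLevel.MEDIUM
--
--     # Low: File writes
--     if cmd_base in {"echo", "cat", "tee", "cp", "mv", "mkdir", "touch"}:
--         return RiskLevel.LOW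
--
--     # Safe: Read-only operations
--     safe_commands = {
--         "ls", "pwd", "cat", "head", "tail", "wc", "grep", "find",
--         "which", "whoami", "date", "echo", "df", "du", "uname",
--     }
--     if cmd_base in safe_commands:
--         return RiskLevel.SAFE
--
--     # Default to medium for unknown commands
--     return RiskLevel.MEDIUM
-- ===== SOURCE B (Python) =====
-- from enum import Enum
--
-- class RiskLevel(str, Enum):
--     """Operation risk levels."""
--     SAFE = "safe"
--     LOW = "low"
--     MEDIUM = "medium"
--     HIGH = "high"
--     CRITICAL = "critical"
--
-- _LEVELS = (RiskLevel.SAFE, RiskLevel.LOW, RiskLevel.MEDIUM, RiskLevel.HIGH, RiskLevel.CRITICAL)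
--
-- _DESTRUCTIVE_FLAGS = frozenset({"-rf", "-fr", "--force", "--recursive", "--no-preserve-root"})
--
-- # One flat rule list; the answer is the MAXIMUM severity rank over all matching
-- # rules (no early returns, no per-level sets).  This is correct because a
-- # first-match in A's descending cascade equals the maximum matching severity:
-- # the only cross-category duplicates, "cat"/"echo", resolve to the higher level.
-- _RULES = (
--     [(c, 4) for c in ("rm", "shred", "dd", "mkfs", "fdisk", "format",
--                       "dropdb", "drop", "truncate")]
--     + [(c, 3) for c in ("sudo", "su", "chmod", "chown", "mount", "umount",
--                         "systemctl", "service", "brew", "apt", "yum", "dnf")]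
--     + [(c, 2) for c in ("git", "npm", "pip", "cargo", "go", "make", "cmake",
--                         "docker", "docker-compose", "kubectl")]
--     + [(c, 1) for c in ("echo", "cat", "tee", "cp", "mv", "mkdir", "touch")]
--     + [(c, 0) for c in ("ls", "pwd", "cat", "head", "tail", "wc", "grep", "find",
--                         "which", "whoami", "date", "echo", "df", "du", "uname")]
-- )
--
-- def assess_command_risk(command: str, args: list[str]) -> RiskLevel:
--     cmd_base = command.lower().split("/")[-1]
--     best = -1
--     for name, rank in _RULES:
--         if name == cmd_base and rank > best:
--             best = rank
--     if any(a in _DESTRUCTIVE_FLAGS for a in args):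
--         best = max(best, 4)
--     if best < 0:
--         best = 2
--     return _LEVELS[best]
-- ===== Notes on version B (the rewrite author's own statement) =====
-- stated objective: alternative
-- what changed: Replaces A's early-return cascade of per-level set-membership tests by a single pass over one flat (command, severity-rank) rule list that accumulates the maximum matching rank (flags fold in as rank 4, default medium), correct because first-match in A's descending cascade equals the maximum matching severity.
import Mathlib
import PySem

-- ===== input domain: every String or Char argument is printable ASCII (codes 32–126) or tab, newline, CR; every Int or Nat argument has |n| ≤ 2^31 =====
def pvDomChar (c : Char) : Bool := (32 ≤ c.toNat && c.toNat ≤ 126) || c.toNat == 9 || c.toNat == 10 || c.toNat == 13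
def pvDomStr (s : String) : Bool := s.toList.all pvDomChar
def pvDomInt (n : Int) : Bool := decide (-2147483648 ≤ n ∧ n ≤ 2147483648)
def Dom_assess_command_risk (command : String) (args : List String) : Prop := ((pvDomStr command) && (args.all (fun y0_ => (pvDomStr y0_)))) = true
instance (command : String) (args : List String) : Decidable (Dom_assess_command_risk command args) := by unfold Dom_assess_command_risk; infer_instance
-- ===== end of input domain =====

-- B replaces A's early-return cascade of per-level set tests by one max-severity
-- fold over a flat rule list (alternative decomposition, same cost).

-- ===== PORT A =====
def pvCriticalCommands : List String :=
  ["rm", "shred", "dd", "mkfs", "fdisk", "format", "dropdb", "drop", "truncate"]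
def pvHighCommands : List String :=
  ["sudo", "su", "chmod", "chown", "mount", "umount",
   "systemctl", "service", "brew", "apt", "yum", "dnf"]
def pvMediumCommands : List String :=
  ["git", "npm", "pip", "cargo", "go", "make", "cmake",
   "docker", "docker-compose", "kubectl"]
def pvLowCommands : List String :=
  ["echo", "cat", "tee", "cp", "mv", "mkdir", "touch"]
def pvSafeCommands : List String :=
  ["ls", "pwd", "cat", "head", "tail", "wc", "grep", "find",
   "which", "whoami", "date", "echo", "df", "du", "uname"]
def pvDestructiveFlags : List String :=
  ["-rf", "-fr", "--force", "--recursive", "--no-preserve-root"]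

-- cmd_base = command.lower().split("/")[-1]; split("/") is always nonempty,
-- so the default "" of pyGetD is never used (exact).
def assess_command_risk (command : String) (args : List String) : String :=
  let cmd_base := PySem.List.pyGetD ((PySem.Str.split? (PySem.Str.lower command) "/").getD []) (-1) ""
  if cmd_base ∈ pvCriticalCommands then "critical"
  else if pvDestructiveFlags.any (fun flag => args.contains flag) then "critical"
  else if cmd_base ∈ pvHighCommands then "high"
  else if cmd_base ∈ pvMediumCommands then "medium"
  else if cmd_base ∈ pvLowCommands then "low"
  else if cmd_base ∈ pvSafeCommands then "safe"
  else "medium"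

-- ===== PORT B =====
def pvLevels : List String := ["safe", "low", "medium", "high", "critical"]

-- the flat rule list of Source B: (command, severity rank)
def pvRules : List (String × Int) :=
  pvCriticalCommands.map (fun c => (c, 4))
  ++ pvHighCommands.map (fun c => (c, 3))
  ++ pvMediumCommands.map (fun c => (c, 2))
  ++ pvLowCommands.map (fun c => (c, 1))
  ++ pvSafeCommands.map (fun c => (c, 0))

-- _LEVELS[best]: best is always in 0..4 after the final defaulting, so the
-- default "" of pyGetD is never used (exact).
def assess_command_risk_alt (command : String) (args : List String) : String :=
  let cmd_base := PySem.List.pyGetD ((PySem.Str.split? (PySem.Str.lower command) "/").getD []) (-1) ""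
  let best : Int := pvRules.foldl
    (fun best p => if p.1 == cmd_base && decide (p.2 > best) then p.2 else best) (-1)
  let best := if args.any (fun a => pvDestructiveFlags.contains a) then max best 4 else best
  let best := if best < 0 then 2 else best
  PySem.List.pyGetD pvLevels best ""

-- ===== PRECONDITION & SPEC =====
def Spec_assess_command_risk (command : String) (args : List String) (out : String) : Prop := out = assess_command_risk_alt command args
instance (command : String) (args : List String) (out : String) : Decidable (Spec_assess_command_risk command args out) := by unfold Spec_assess_command_risk; infer_instance

-- ===== CLAIM (what is proved, stated in full; the proofs are below) =====
def Claim_equal_assess_command_risk : Prop := ∀ (command : String) (args : List String), Dom_assess_command_risk command args → Spec_assess_command_risk command args (assess_command_risk command args)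

-- ===== LEMMAS AND PROOFS =====

-- the two directions of the `any` flag check agree
lemma pv_flag_any (args : List String) :
    pvDestructiveFlags.any (fun flag => args.contains flag)
      = args.any (fun a => pvDestructiveFlags.contains a) := by
  simp only [List.any_eq, List.contains_iff_mem]
  exact decide_eq_decide.mpr
    ⟨fun ⟨x, hx1, hx2⟩ => ⟨x, hx2, hx1⟩, fun ⟨x, hx1, hx2⟩ => ⟨x, hx2, hx1⟩⟩

-- a fold over rules none of which match b leaves the accumulator unchanged
lemma pv_fold_nomatch (b : String) (rules : List (String × Int)) (init : Int)
    (h : ∀ p ∈ rules, p.1 ≠ b) :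
    rules.foldl (fun best p => if p.1 == b && decide (p.2 > best) then p.2 else best) init
      = init := by
  induction rules generalizing init with
  | nil => rfl
  | cons hd tl ih =>
    simp only [List.foldl_cons, beq_eq_false_iff_ne.mpr (h hd (by simp)),
      Bool.false_and, Bool.false_eq_true, if_neg, not_false_iff]
    exact ih init (fun p hp => h p (List.mem_cons_of_mem _ hp))

-- the main per-base comparison: A's cascade equals B's max-fold, for any base
-- string b and any value f of the destructive-flag test
set_option maxRecDepth 4000 in
lemma pv_main (b : String) (f : Bool) :
    (if b ∈ pvCriticalCommands then "critical"
     else if f then "critical"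
     else if b ∈ pvHighCommands then "high"
     else if b ∈ pvMediumCommands then "medium"
     else if b ∈ pvLowCommands then "low"
     else if b ∈ pvSafeCommands then "safe"
     else "medium")
    = (let best : Int := pvRules.foldl
         (fun best p => if p.1 == b && decide (p.2 > best) then p.2 else best) (-1)
       let best := if f then max best 4 else best
       let best := if best < 0 then 2 else best
       PySem.List.pyGetD pvLevels best "") := by
  by_cases h1 : b ∈ pvCriticalCommands
  · simp only [pvCriticalCommands, List.mem_cons, List.not_mem_nil, or_false] at h1
    rcases h1 with rfl|rfl|rfl|rfl|rfl|rfl|rfl|rfl|rfl <;> cases f <;> decide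
  by_cases h2 : b ∈ pvHighCommands
  · simp only [pvHighCommands, List.mem_cons, List.not_mem_nil, or_false] at h2
    rcases h2 with rfl|rfl|rfl|rfl|rfl|rfl|rfl|rfl|rfl|rfl|rfl|rfl <;> cases f <;> decide
  by_cases h3 : b ∈ pvMediumCommands
  · simp only [pvMediumCommands, List.mem_cons, List.not_mem_nil, or_false] at h3
    rcases h3 with rfl|rfl|rfl|rfl|rfl|rfl|rfl|rfl|rfl|rfl <;> cases f <;> decide
  by_cases h4 : b ∈ pvLowCommands
  · simp only [pvLowCommands, List.mem_cons, List.not_mem_nil, or_false] at h4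
    rcases h4 with rfl|rfl|rfl|rfl|rfl|rfl|rfl <;> cases f <;> decide
  by_cases h5 : b ∈ pvSafeCommands
  · simp only [pvSafeCommands, List.mem_cons, List.not_mem_nil, or_false] at h5
    rcases h5 with rfl|rfl|rfl|rfl|rfl|rfl|rfl|rfl|rfl|rfl|rfl|rfl|rfl|rfl|rfl <;>
      cases f <;> decide
  · -- b matches no rule: the fold stays at -1
    have hall : ∀ p ∈ pvRules, p.1 ≠ b := by
      intro p hp
      simp only [pvRules, List.mem_append, List.mem_map] at hp
      rcases hp with ((((⟨c, hc, rfl⟩|⟨c, hc, rfl⟩)|⟨c, hc, rfl⟩)|⟨c, hc, rfl⟩)|⟨c, hc, rfl⟩)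
      · exact fun he => h1 (he ▸ hc)
      · exact fun he => h2 (he ▸ hc)
      · exact fun he => h3 (he ▸ hc)
      · exact fun he => h4 (he ▸ hc)
      · exact fun he => h5 (he ▸ hc)
    simp only [if_neg h1, if_neg h2, if_neg h3, if_neg h4, if_neg h5,
      pv_fold_nomatch b pvRules (-1) hall]
    cases f <;> decide

-- ===== VERDICT (by name: the statement is the Claim_ definition above) =====
theorem assess_command_risk_spec : Claim_equal_assess_command_risk := by
  intro command args _
  unfold Spec_assess_command_risk assess_command_risk assess_command_risk_alt
  rw [pv_flag_any]
  generalize (PySem.List.pyGetD ((PySem.Str.split? (PySem.Str.lower command) "/").getD []) (-1) "" : String) = b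
  generalize (args.any (fun a => pvDestructiveFlags.contains a)) = f
  exact pv_main b f
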